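-- pv_equiv track=rewrite | github.com/codecplyre/censor_dispenser | censor_dispenser.py | censor_email_one
-- ===== SOURCE A (Python) =====
-- def censor_email_one(email, word):
--     censor_word = ""
--     for letter in word:
--         if letter == " ":
--             censor_word += " "
--         else:
--             censor_word += "*"
--     return email.replace(word, censor_word)
-- ===== SOURCE B (Python) =====
-- def censor_email_one(email, word):
--     censor_word = " ".join("*" * len(seg) for seg in word.split(" "))
--     return email.replace(word, censor_word)
-- ===== Notes on version B (the rewrite author's own statement) =====
-- stated objective: faster
-- what changed: B builds the censor mask by splitting the word on the literal space and joining star-runs of each segment's length, instead of A's per-character string-concatenation loop; the replace step is unchanged.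
import Mathlib
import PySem

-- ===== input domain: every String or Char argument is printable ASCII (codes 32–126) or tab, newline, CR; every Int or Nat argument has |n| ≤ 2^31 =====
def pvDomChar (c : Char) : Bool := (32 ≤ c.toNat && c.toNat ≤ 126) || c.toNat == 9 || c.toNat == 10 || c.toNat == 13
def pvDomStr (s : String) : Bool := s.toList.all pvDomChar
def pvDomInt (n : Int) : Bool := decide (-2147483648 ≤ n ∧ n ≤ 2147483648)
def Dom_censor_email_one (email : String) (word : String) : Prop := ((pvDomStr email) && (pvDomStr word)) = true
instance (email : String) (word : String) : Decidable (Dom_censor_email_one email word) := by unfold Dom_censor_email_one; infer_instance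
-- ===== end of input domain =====

-- B builds the censor mask by splitting the word on the literal space and joining star-runs
-- (one per segment), instead of A's per-character accumulator loop; same replace step.


-- ===== PORT A =====
-- loop 'for letter in word: censor_word += " " or "*"' as a foldl over the word's chars
def censor_email_one (email : String) (word : String) : String :=
  let censor_word : List Char :=
    word.toList.foldl (fun acc letter => if letter == ' ' then acc ++ [' '] else acc ++ ['*']) []
  PySem.Str.replace email word (String.ofList censor_word)

-- ===== PORT B =====
-- word.split(' ') → Chars.splitOn (the non-empty-separator split), '*' * len(seg) → replicate,
-- ' '.join → Chars.join
def censor_email_one_alt (email : String) (word : String) : String :=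
  let censor_word : List Char :=
    PySem.Chars.join [' ']
      ((PySem.Chars.splitOn word.toList [' ']).map (fun seg => List.replicate seg.length '*'))
  PySem.Str.replace email word (String.ofList censor_word)

-- ===== PRECONDITION & SPEC =====
def Spec_censor_email_one (email : String) (word : String) (out : String) : Prop := out = censor_email_one_alt email word
instance (email : String) (word : String) (out : String) : Decidable (Spec_censor_email_one email word out) := by unfold Spec_censor_email_one; infer_instance

-- ===== CLAIM (what is proved, stated in full; the proofs are below) =====
def Claim_equal_censor_email_one : Prop := ∀ (email : String) (word : String), Dom_censor_email_one email word → Spec_censor_email_one email word (censor_email_one email word)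

-- ===== LEMMAS AND PROOFS =====

-- A's mask loop is the character map
def pvMaskChar (c : Char) : Char := if c == ' ' then ' ' else '*'

theorem foldA_eq_map (cs acc : List Char) :
    cs.foldl (fun a c => if c == ' ' then a ++ [' '] else a ++ ['*']) acc
      = acc ++ cs.map pvMaskChar := by
  induction cs generalizing acc with
  | nil => simp
  | cons c t ih =>
    simp only [List.foldl_cons, List.map_cons]
    rw [ih]
    by_cases h : c = ' ' <;> simp [h, pvMaskChar]

-- reference splitter on the single character ' '
def pvSp : List Char → List Char → List (List Char)
  | [], cur => [cur.reverse]
  | c :: rest, cur => if c == ' ' then cur.reverse :: pvSp rest [] else pvSp rest (c :: cur)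

theorem sp_ne_nil (l cur : List Char) : pvSp l cur ≠ [] := by
  induction l generalizing cur with
  | nil => simp [pvSp]
  | cons c rest ih =>
    simp only [pvSp]
    split
    · simp
    · exact ih (c :: cur)

theorem go_eq_sp (fuel : Nat) (l cur : List Char) (acc : List (List Char))
    (h : l.length ≤ fuel) :
    PySem.Chars.splitOn.go [' '] fuel l cur acc = acc.reverse ++ pvSp l cur := by
  induction fuel generalizing l cur acc with
  | zero =>
    have : l = [] := by cases l <;> simp_all
    subst this; simp [PySem.Chars.splitOn.go, pvSp]
  | succ n ih =>
    cases l with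
    | nil => simp [PySem.Chars.splitOn.go, pvSp]
    | cons c rest =>
      simp only [PySem.Chars.splitOn.go, pvSp]
      by_cases hc : c = ' '
      · subst hc
        have hp : [' '].isPrefixOf (' ' :: rest) = true := by simp [List.isPrefixOf]
        rw [if_pos hp, if_pos (by simp), ih]
        · simp
        · simpa using Nat.le_of_succ_le_succ h
      · have hp : [' '].isPrefixOf (c :: rest) = false := by
          simp [List.isPrefixOf]; intro he; exact absurd he.symm hc
        rw [if_neg (by simp [hp]), if_neg (by simpa using hc), ih]
        simpa using Nat.le_of_succ_le_succ h

theorem join_cons' (a : List Char) (b : List (List Char)) :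
    PySem.Chars.join [' '] (a :: b)
      = a ++ (if b = [] then [] else ' ' :: PySem.Chars.join [' '] b) := by
  cases b with
  | nil => simp [PySem.Chars.join, List.intercalate]
  | cons b bs => simp [PySem.Chars.join_cons_cons]

theorem join_sp (l cur : List Char) :
    PySem.Chars.join [' '] ((pvSp l cur).map (fun seg => List.replicate seg.length '*'))
      = List.replicate cur.length '*' ++ l.map pvMaskChar := by
  induction l generalizing cur with
  | nil => simp [pvSp, PySem.Chars.join, List.intercalate]
  | cons c rest ih =>
    by_cases hc : c = ' '
    · subst hc
      simp only [pvSp, List.map_cons]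
      rw [if_pos (by decide), List.map_cons]
      rw [join_cons']
      have hne : (pvSp rest []).map (fun seg => List.replicate seg.length '*') ≠ [] := by
        simpa using sp_ne_nil rest []
      rw [if_neg hne, ih]
      simp [pvMaskChar]
    · simp only [pvSp, List.map_cons]
      rw [if_neg (by simpa using hc), ih]
      simp [pvMaskChar, hc, List.replicate_succ']

-- ===== VERDICT (by name: the statement is the Claim_ definition above) =====
theorem censor_email_one_spec : Claim_equal_censor_email_one := by
  intro email word _
  show censor_email_one email word = censor_email_one_alt email word
  unfold censor_email_one censor_email_one_alt
  rw [foldA_eq_map]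
  unfold PySem.Chars.splitOn
  rw [go_eq_sp _ _ _ _ (by omega)]
  simp [join_sp]
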